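-- pv_equiv track=rewrite | github.com/Marciland/advent-of-code | day2.py | set_valid
-- ===== SOURCE A (Python) =====
-- MAX_RED = 12
--
-- MAX_GREEN = 13
--
-- MAX_BLUE = 14
--
-- def set_valid(game_set: dict) -> bool:
--     '''check if a set is valid'''
--     for color, amount in game_set.items():
--         if color == 'red' and amount > MAX_RED:
--             return False
--         if color == 'green' and amount > MAX_GREEN:
--             return False
--         if color == 'blue' and amount > MAX_BLUE:
--             return False
--     return True
-- ===== SOURCE B (Python) =====
-- MAX_RED = 12
--
-- MAX_GREEN = 13
--
-- MAX_BLUE = 14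
--
-- def set_valid(game_set: dict) -> bool:
--     '''check if a set is valid'''
--     return (game_set.get('red', 0) <= MAX_RED
--             and game_set.get('green', 0) <= MAX_GREEN
--             and game_set.get('blue', 0) <= MAX_BLUE)
-- ===== Notes on version B (the rewrite author's own statement) =====
-- stated objective: simpler
-- what changed: Replaced the loop over game_set.items() with three direct .get(color, 0) lookups combined by short-circuit and; no loop state is maintained and unknown keys are never inspected.
import Mathlib
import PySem

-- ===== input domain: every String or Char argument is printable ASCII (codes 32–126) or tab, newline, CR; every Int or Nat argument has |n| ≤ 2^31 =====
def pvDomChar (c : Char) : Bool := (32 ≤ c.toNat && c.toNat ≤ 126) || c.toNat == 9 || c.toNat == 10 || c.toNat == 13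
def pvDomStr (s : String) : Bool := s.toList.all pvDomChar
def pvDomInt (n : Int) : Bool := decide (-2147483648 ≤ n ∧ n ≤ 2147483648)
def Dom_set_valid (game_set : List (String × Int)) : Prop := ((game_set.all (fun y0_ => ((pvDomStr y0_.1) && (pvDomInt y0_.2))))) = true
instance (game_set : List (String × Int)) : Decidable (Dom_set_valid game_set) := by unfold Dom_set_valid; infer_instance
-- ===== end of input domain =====

-- B replaces A's loop over the items with three direct default-0 lookups joined by
-- short-circuit &&: simpler, no loop state, unknown keys never inspected.

-- ===== PORT A =====
def set_valid (game_set : List (String × Int)) : Bool :=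
  match game_set with
  | [] => true
  | (color, amount) :: rest =>
    if color == "red" && amount > 12 then false
    else if color == "green" && amount > 13 then false
    else if color == "blue" && amount > 14 then false
    else set_valid rest

-- ===== PORT B =====
-- dict.get(k, dflt) on the association list: first matching key, else the default
def dictGetD (d : List (String × Int)) (k : String) (dflt : Int) : Int :=
  ((d.find? (fun p => p.1 == k)).map Prod.snd).getD dflt

def set_valid_alt (game_set : List (String × Int)) : Bool :=
  decide (dictGetD game_set "red" 0 ≤ 12)
    && decide (dictGetD game_set "green" 0 ≤ 13)
    && decide (dictGetD game_set "blue" 0 ≤ 14)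

-- ===== PRECONDITION & SPEC =====
-- Pre_ excludes association lists with duplicate keys: they represent no Python dict
-- (a dict's keys are unique), so A's behaviour on them is not defined by the source.
def Pre_set_valid (game_set : List (String × Int)) : Prop :=
  (game_set.map Prod.fst).Nodup
instance (game_set : List (String × Int)) : Decidable (Pre_set_valid game_set) := by
  unfold Pre_set_valid; infer_instance

def pvWitness_set_valid : (List (String × Int)) := [("red", 5), ("green", 13), ("blue", 2)]

def Spec_set_valid (game_set : List (String × Int)) (out : Bool) : Prop := out = set_valid_alt game_set
instance (game_set : List (String × Int)) (out : Bool) : Decidable (Spec_set_valid game_set out) := by unfold Spec_set_valid; infer_instance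

-- ===== CLAIM (what is proved, stated in full; the proofs are below) =====
def Claim_equal_set_valid : Prop := ∀ (game_set : List (String × Int)), Dom_set_valid game_set → Pre_set_valid game_set → Spec_set_valid game_set (set_valid game_set)

-- ===== LEMMAS AND PROOFS =====

-- a key absent from the list looks up to the default
theorem dictGetD_of_not_mem (d : List (String × Int)) (k : String) (dflt : Int)
    (h : k ∉ d.map Prod.fst) : dictGetD d k dflt = dflt := by
  unfold dictGetD
  rw [List.find?_eq_none.mpr]
  · rfl
  · intro p hp hbeq
    exact h (List.mem_map.mpr ⟨p, hp, by simpa using hbeq⟩)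

theorem dictGetD_cons (p : String × Int) (rest : List (String × Int)) (k : String) (dflt : Int) :
    dictGetD (p :: rest) k dflt = if p.1 == k then p.2 else dictGetD rest k dflt := by
  unfold dictGetD
  rcases h : (p.1 == k) with _ | _ <;> simp [h]

theorem set_valid_eq_alt (game_set : List (String × Int))
    (h : (game_set.map Prod.fst).Nodup) : set_valid game_set = set_valid_alt game_set := by
  induction game_set with
  | nil => rfl
  | cons p rest ih =>
    obtain ⟨c, a⟩ := p
    simp only [List.map_cons, List.nodup_cons] at h
    obtain ⟨hnm, hnd⟩ := h
    have ih' := ih hnd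
    simp only [set_valid, set_valid_alt, dictGetD_cons]
    by_cases hr : c = "red"
    · subst hr
      by_cases ha : a > 12
      · simp [ha]
      · have : dictGetD rest "red" 0 = 0 := dictGetD_of_not_mem _ _ _ hnm
        have ha' : a ≤ 12 := by omega
        simp only [set_valid_alt, this] at ih'
        simp [ha, ha', ih']
    · by_cases hg : c = "green"
      · subst hg
        by_cases ha : a > 13
        · simp [ha]
        · have : dictGetD rest "green" 0 = 0 := dictGetD_of_not_mem _ _ _ hnm
          have ha' : a ≤ 13 := by omega
          simp only [set_valid_alt, this] at ih'
          simp [ha, ha', ih']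
      · by_cases hb : c = "blue"
        · subst hb
          by_cases ha : a > 14
          · simp [ha]
          · have : dictGetD rest "blue" 0 = 0 := dictGetD_of_not_mem _ _ _ hnm
            have ha' : a ≤ 14 := by omega
            simp only [set_valid_alt, this] at ih'
            simp [ha, ha', ih']
        · simp [hr, hg, hb, ih', set_valid_alt]

-- ===== VERDICT (by name: the statement is the Claim_ definition above) =====
theorem set_valid_spec : Claim_equal_set_valid := by
  intro gs _ hpre
  exact set_valid_eq_alt gs hpre
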